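-- pv_equiv track=rewrite | github.com/francott7/qwas-qc-ai-report | src/01_qc_hail.py | process_gt_chunk
-- ===== SOURCE A (Python) =====
-- def process_gt_chunk(lines):
--     total = 0
--     non_missing = 0
--     het = 0
--     non_ref = 0
--     alt_alleles = 0
--     ref_alleles = 0
--     for gt in lines:
--         gt = gt.strip()
--         total += 1
--         if gt == './.':
--             continue
--         non_missing += 1
--         # Heterozygous: 0/1, 1/0, 0|1, 1|0
--         if gt in {'0/1', '1/0', '0|1', '1|0'}:
--             het += 1
--         # Non-ref: not 0/0 or 0|0
--         if gt not in {'0/0', '0|0'}: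
--             non_ref += 1
--         # Count alleles
--         if '/' in gt or '|' in gt:
--             sep = '/' if '/' in gt else '|'
--             alleles = gt.split(sep)
--             for a in alleles:
--                 if a == '.':
--                     continue
--                 elif a == '0':
--                     ref_alleles += 1
--                 elif a == '1':
--                     alt_alleles += 1
--                 # ignore multi-allelic for now
--     return total, non_missing, het, non_ref, alt_alleles, ref_alleles
-- ===== SOURCE B (Python) =====
-- def process_gt_chunk(lines):
--     # Staged decomposition: strip once, drop missing, then compute each of the
--     # six counters as an independent pass (lengths, counted predicates, allele sums).
--     gts = [gt.strip() for gt in lines]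
--     obs = [g for g in gts if g != './.']
--
--     def alleles(g):
--         if '/' in g:
--             return g.split('/')
--         if '|' in g:
--             return g.split('|')
--         return []
--
--     total = len(gts)
--     non_missing = len(obs)
--     het = sum(1 for g in obs if g in ('0/1', '1/0', '0|1', '1|0'))
--     non_ref = sum(1 for g in obs if g not in ('0/0', '0|0'))
--     alt_alleles = sum(alleles(g).count('1') for g in obs)
--     ref_alleles = sum(alleles(g).count('0') for g in obs)
--     return total, non_missing, het, non_ref, alt_alleles, ref_alleles
-- ===== Notes on version B (the rewrite author's own statement) =====
-- stated objective: alternative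
-- what changed: B replaces A's single fold that threads six counters through every line by a staged decomposition: strip once, filter out missing genotypes, then compute each of the six counters as an independent pass (lengths, predicate counts, per-genotype allele sums).
import Mathlib
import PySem

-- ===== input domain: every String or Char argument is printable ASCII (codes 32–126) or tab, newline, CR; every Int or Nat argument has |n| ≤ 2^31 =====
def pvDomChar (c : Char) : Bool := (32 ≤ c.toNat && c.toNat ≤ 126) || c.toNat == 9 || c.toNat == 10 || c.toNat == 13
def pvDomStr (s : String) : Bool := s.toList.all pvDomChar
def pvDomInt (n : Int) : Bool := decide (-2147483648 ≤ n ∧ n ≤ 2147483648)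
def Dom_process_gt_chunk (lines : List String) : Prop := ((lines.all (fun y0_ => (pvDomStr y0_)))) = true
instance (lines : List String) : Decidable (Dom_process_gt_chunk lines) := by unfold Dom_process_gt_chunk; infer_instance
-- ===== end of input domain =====

-- B replaces A's single six-counter fold by a staged decomposition (strip, filter
-- missing, then six independent passes); objective: alternative, same exact value.

-- ===== PORT A =====
-- A's loop body (one line gt0 updates the six counters); gt.split(sep) with sep ∈ {"/", "|"}
-- (nonempty) is PySem.Str.split?, always `some` here, hence `.getD []` — exact.
def pvAStep (s : Int × Int × Int × Int × Int × Int) (gt0 : String) : Int × Int × Int × Int × Int × Int :=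
  match s with
  | (total, nm, het, nr, alt, ref) =>
    let gt := PySem.Str.strip gt0
    let total := total + 1
    if gt == "./." then (total, nm, het, nr, alt, ref)
    else
      let nm := nm + 1
      let het := if gt == "0/1" || gt == "1/0" || gt == "0|1" || gt == "1|0" then het + 1 else het
      let nr := if !(gt == "0/0" || gt == "0|0") then nr + 1 else nr
      if PySem.Str.isIn "/" gt || PySem.Str.isIn "|" gt then
        let sep := if PySem.Str.isIn "/" gt then "/" else "|"
        let alleles := (PySem.Str.split? gt sep).getD []
        let p := alleles.foldl (fun (p : Int × Int) a =>
            if a == "." then p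
            else if a == "0" then (p.1, p.2 + 1)
            else if a == "1" then (p.1 + 1, p.2)
            else p) (alt, ref)
        (total, nm, het, nr, p.1, p.2)
      else (total, nm, het, nr, alt, ref)

def process_gt_chunk (lines : List String) : Int × Int × Int × Int × Int × Int :=
  lines.foldl pvAStep (0, 0, 0, 0, 0, 0)

-- ===== PORT B =====
def pvIsHet (g : String) : Bool := g == "0/1" || g == "1/0" || g == "0|1" || g == "1|0"
def pvIsNonRef (g : String) : Bool := !(g == "0/0" || g == "0|0")
def pvAlleles (g : String) : List String :=
  if PySem.Str.isIn "/" g then (PySem.Str.split? g "/").getD []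
  else if PySem.Str.isIn "|" g then (PySem.Str.split? g "|").getD []
  else []

def process_gt_chunk_alt (lines : List String) : Int × Int × Int × Int × Int × Int :=
  let gts := lines.map PySem.Str.strip
  let obs := gts.filter (fun g => !(g == "./."))
  ((gts.length : Int),
   (obs.length : Int),
   ((obs.countP pvIsHet : Nat) : Int),
   ((obs.countP pvIsNonRef : Nat) : Int),
   ((obs.map (fun g => (PySem.List.count (pvAlleles g) "1" : Int))).sum),
   ((obs.map (fun g => (PySem.List.count (pvAlleles g) "0" : Int))).sum))

-- ===== PRECONDITION & SPEC =====
def Spec_process_gt_chunk (lines : List String) (out : Int × Int × Int × Int × Int × Int) : Prop := out = process_gt_chunk_alt lines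
instance (lines : List String) (out : Int × Int × Int × Int × Int × Int) : Decidable (Spec_process_gt_chunk lines out) := by unfold Spec_process_gt_chunk; infer_instance

-- ===== CLAIM (what is proved, stated in full; the proofs are below) =====
def Claim_equal_process_gt_chunk : Prop := ∀ (lines : List String), Dom_process_gt_chunk lines → Spec_process_gt_chunk lines (process_gt_chunk lines)

-- ===== LEMMAS AND PROOFS =====

-- the per-occurrence contribution of one (stripped) genotype string to the six counters
def pvContrib (g : String) : Int × Int × Int × Int × Int × Int :=
  if g == "./." then (1, 0, 0, 0, 0, 0)
  else (1, 1, if pvIsHet g then 1 else 0, if pvIsNonRef g then 1 else 0,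
        (PySem.List.count (pvAlleles g) "1" : Int), (PySem.List.count (pvAlleles g) "0" : Int))

-- B's six counters, as a function of the stripped genotype list
def pvF (gts : List String) : Int × Int × Int × Int × Int × Int :=
  let obs := gts.filter (fun g => !(g == "./."))
  ((gts.length : Int), (obs.length : Int),
   ((obs.countP pvIsHet : Nat) : Int), ((obs.countP pvIsNonRef : Nat) : Int),
   ((obs.map (fun g => (PySem.List.count (pvAlleles g) "1" : Int))).sum),
   ((obs.map (fun g => (PySem.List.count (pvAlleles g) "0" : Int))).sum))

lemma pvInnerFold (als : List String) (a r : Int) :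
    als.foldl (fun (p : Int × Int) x =>
        if x == "." then p
        else if x == "0" then (p.1, p.2 + 1)
        else if x == "1" then (p.1 + 1, p.2)
        else p) (a, r)
      = (a + (PySem.List.count als "1" : Int), r + (PySem.List.count als "0" : Int)) := by
  induction als generalizing a r with
  | nil => simp [PySem.List.count]
  | cons x t ih =>
    simp only [List.foldl_cons, PySem.List.count] at *
    by_cases h1 : x = "." <;> by_cases h2 : x = "0" <;> by_cases h3 : x = "1" <;>
      simp_all <;> ring

lemma pvStepA_eq (s : Int × Int × Int × Int × Int × Int) (g0 : String) :
    pvAStep s g0 = s + pvContrib (PySem.Str.strip g0) := by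
  obtain ⟨t, nm, ht, nr, al, rf⟩ := s
  unfold pvAStep pvContrib pvIsHet pvIsNonRef pvAlleles
  generalize PySem.Str.strip g0 = g
  by_cases hm : (g == "./.") = true
  · simp [hm]
  · simp only [hm, Bool.not_eq_true] at *
    rw [pvInnerFold]
    split_ifs <;> simp_all [PySem.List.count]

lemma pvF_cons (g : String) (gs : List String) : pvF (g :: gs) = pvContrib g + pvF gs := by
  unfold pvF pvContrib
  by_cases hm : (g == "./.") = true
  · simp only [hm, if_true, List.filter_cons, Bool.not_true, Bool.false_eq_true, if_false,
      List.length_cons, Prod.mk_add_mk, Prod.mk.injEq]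
    refine ⟨by push_cast; ring, by ring, by ring, by ring, by ring, by ring⟩
  · simp [hm, List.countP_cons, Prod.mk.injEq]
    refine ⟨by ring, by ring, ?_, ?_⟩ <;> split_ifs <;> ring

lemma pvFoldA (lines : List String) (s : Int × Int × Int × Int × Int × Int) :
    lines.foldl pvAStep s = s + pvF (lines.map PySem.Str.strip) := by
  induction lines generalizing s with
  | nil => simp [pvF]
  | cons x t ih =>
    simp only [List.foldl_cons, List.map_cons]
    rw [ih, pvStepA_eq, pvF_cons, add_assoc]

-- ===== VERDICT (by name: the statement is the Claim_ definition above) =====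
theorem process_gt_chunk_spec : Claim_equal_process_gt_chunk := by
  intro lines _
  unfold Spec_process_gt_chunk process_gt_chunk process_gt_chunk_alt
  rw [pvFoldA]
  simp [pvF]
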